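-- pv_equiv track=rewrite | github.com/kaya53/daily-algorithm | 00_REGULAR_CLASS/수업코드/algo_day02/02_day02_230202/08_simple_sort.py | code_01
-- ===== SOURCE A (Python) =====
-- def code_01(scores):
--     lst = [(idx, score) for idx, score in enumerate(scores, start=1)]
--     student, grade = [-1, -1, -1], [-1, -1, -1]
--
--     for idx, score in lst:
--         if score > grade[0]:
--             grade[1], grade[2] = grade[0], grade[1]
--             student[1], student[2] = student[0], student[1]
--             student[0], grade[0] = idx, score
--         elif score > grade[1]:
--             student[2], grade[2] = student[1], grade[1]
--             student[1], grade[1] = idx, score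
--         elif score > grade[2]:
--             student[2], grade[2] = idx, score
--     return student
-- ===== SOURCE B (Python) =====
-- def code_01(scores):
--     cand = [(i, s) for i, s in enumerate(scores, start=1) if s > -1]
--     cand.sort(key=lambda t: -t[1])  # stable: earlier index wins ties
--     idxs = [i for i, _ in cand[:3]]
--     return idxs + [-1] * (3 - len(idxs))
-- ===== Notes on version B (the rewrite author's own statement) =====
-- stated objective: idiomatic
-- what changed: Replaces A's single-pass cascading three-slot shift loop with filter (score > -1) + stable sort by descending score + take the first three indices and pad with -1.
import Mathlib
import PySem

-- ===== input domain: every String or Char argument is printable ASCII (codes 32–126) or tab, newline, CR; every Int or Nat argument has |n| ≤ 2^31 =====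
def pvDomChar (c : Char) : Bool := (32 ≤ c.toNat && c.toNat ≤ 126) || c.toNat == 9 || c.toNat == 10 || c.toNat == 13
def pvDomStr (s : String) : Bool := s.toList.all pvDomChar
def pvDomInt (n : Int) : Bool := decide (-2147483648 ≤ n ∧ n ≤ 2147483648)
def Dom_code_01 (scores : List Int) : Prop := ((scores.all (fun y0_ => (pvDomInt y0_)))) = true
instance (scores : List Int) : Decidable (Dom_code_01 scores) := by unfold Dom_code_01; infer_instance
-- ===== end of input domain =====

-- B replaces A's cascading three-slot update loop with filter + stable sort + take 3 (idiomatic; same result).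

-- ===== PORT A =====
-- one iteration of A's for-loop; state = ((student0,student1,student2),(grade0,grade1,grade2))
def code01step (st : (Int × Int × Int) × (Int × Int × Int)) (p : Int × Int) :
    (Int × Int × Int) × (Int × Int × Int) :=
  let ((s0, s1, s2), (g0, g1, g2)) := st
  let (idx, score) := p
  if score > g0 then ((idx, s0, s1), (score, g0, g1))
  else if score > g1 then ((s0, idx, s1), (g0, score, g1))
  else if score > g2 then ((s0, s1, idx), (g0, g1, score))
  else st

def code_01 (scores : List Int) : List Int :=
  let lst := PySem.List.enumerate scores 1
  let st := lst.foldl code01step ((-1, -1, -1), (-1, -1, -1))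
  [st.1.1, st.1.2.1, st.1.2.2]

-- ===== PORT B =====
def code_01_alt (scores : List Int) : List Int :=
  let cand := (PySem.List.enumerate scores 1).filter (fun p => decide (p.2 > -1))
  let sc := PySem.List.sorted cand (fun t => -t.2)
  let idxs := (sc.take 3).map (fun p => p.1)   -- cand[:3] with nonnegative bound = take 3
  idxs ++ List.replicate (3 - idxs.length) (-1)

-- ===== PRECONDITION & SPEC =====
def Spec_code_01 (scores : List Int) (out : List Int) : Prop := out = code_01_alt scores
instance (scores : List Int) (out : List Int) : Decidable (Spec_code_01 scores out) := by unfold Spec_code_01; infer_instance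

-- ===== CLAIM (what is proved, stated in full; the proofs are below) =====
def Claim_equal_code_01 : Prop := ∀ (scores : List Int), Dom_code_01 scores → Spec_code_01 scores (code_01 scores)

-- ===== LEMMAS AND PROOFS =====

-- A's loop state as a function of the (sorted) candidate list's first three elements
def pvView : List (Int × Int) → (Int × Int × Int) × (Int × Int × Int)
  | [] => ((-1, -1, -1), (-1, -1, -1))
  | [a] => ((a.1, -1, -1), (a.2, -1, -1))
  | [a, b] => ((a.1, b.1, -1), (a.2, b.2, -1))
  | a :: b :: c :: _ => ((a.1, b.1, c.1), (a.2, b.2, c.2))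

theorem step_view (l : List (Int × Int)) (h : ∀ q ∈ l, (-1 : Int) < q.2) (p : Int × Int) :
    code01step (pvView l) p =
      pvView (if (-1 : Int) < p.2 then
        PySem.List.insertBy (fun a b => decide ((-(a.2) : Int) < -(b.2))) p l else l) := by
  obtain ⟨pi, ps⟩ := p
  rcases l with _ | ⟨⟨ai,as⟩, _ | ⟨⟨bi,bs⟩, _ | ⟨⟨ci,cs⟩, t⟩⟩⟩ <;>
    (try simp only [List.mem_cons, forall_eq_or_imp] at h) <;>
    by_cases hp : (-1:Int) < ps <;>
      simp [hp, pvView, code01step, PySem.List.insertBy] <;>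
      (try split_ifs) <;>
      (try simp_all [Prod.mk.injEq]) <;>
      omega

theorem fold_view (lst : List (Int × Int)) (l : List (Int × Int))
    (h : ∀ q ∈ l, (-1 : Int) < q.2) :
    lst.foldl code01step (pvView l) =
      pvView (lst.foldl (fun acc p => if (-1 : Int) < p.2 then
        PySem.List.insertBy (fun a b => decide ((-(a.2) : Int) < -(b.2))) p acc else acc) l) := by
  induction lst generalizing l with
  | nil => rfl
  | cons p t ih =>
      simp only [List.foldl_cons, step_view l h p]
      apply ih
      intro q hq
      by_cases hp : (-1 : Int) < p.2
      · simp only [if_pos hp] at hq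
        rcases (PySem.List.mem_insertBy _ _ _ _).1 hq with rfl | hq'
        · exact hp
        · exact h q hq'
      · simp only [if_neg hp] at hq; exact h q hq

-- ===== VERDICT (by name: the statement is the Claim_ definition above) =====
theorem out_view (S : List (Int × Int)) :
    [(pvView S).1.1, (pvView S).1.2.1, (pvView S).1.2.2] =
      ((S.take 3).map (fun p => p.1)) ++
        List.replicate (3 - ((S.take 3).map (fun p => p.1)).length) (-1) := by
  rcases S with _ | ⟨a, _ | ⟨b, _ | ⟨c, t⟩⟩⟩ <;> rfl

theorem code_01_spec : Claim_equal_code_01 := by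
  intro scores _
  unfold Spec_code_01 code_01 code_01_alt
  dsimp only
  have h0 : ∀ q ∈ ([] : List (Int × Int)), (-1 : Int) < q.2 := by simp
  have hfold := fold_view (PySem.List.enumerate scores 1) [] h0
  have hsort : (PySem.List.enumerate scores 1).foldl
      (fun acc p => if (-1 : Int) < p.2 then
        PySem.List.insertBy (fun a b => decide ((-(a.2) : Int) < -(b.2))) p acc else acc) [] =
      PySem.List.sorted ((PySem.List.enumerate scores 1).filter (fun p => decide (p.2 > -1)))
        (fun t => -t.2) := by
    rw [PySem.List.sorted_eq_foldl_insertBy, List.foldl_filter]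
    congr 1
    funext acc p
    by_cases hp : (-1:Int) < p.2 <;> simp [hp]
  rw [show (pvView [] : (Int × Int × Int) × (Int × Int × Int)) = ((-1,-1,-1),(-1,-1,-1)) from rfl] at hfold
  rw [hfold, hsort]
  exact out_view _
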